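-- pv_equiv track=rewrite | github.com/huashan1102/PyUpGuard | code_compat/target_library_conflict.py | find_parents_chain
-- ===== SOURCE A (Python) =====
-- def find_parents_chain(reverse_graph, node):
--     """
--     找到指定节点的所有父节点，并以调用链的方式输出。
--     """
--     parent_chains = []  # 用来记录所有的父节点链
--     visited = set()     # 用来记录已访问的节点
--
--     def _find_parents_recursive(current_node, chain):
--         # 如果当前节点有父节点且没有被访问过
--         if current_node in reverse_graph and current_node not in visited:
--             visited.add(current_node)
--             # 记录当前节点到调用链
--             for parent in reverse_graph[current_node]:
--                 new_chain = chain + [parent]  # 更新调用链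
--                 parent_chains.append(new_chain)  # 将新链加入结果
--                 _find_parents_recursive(parent, new_chain)  # 递归查找父节点
--
--     # 从目标节点开始查找
--     _find_parents_recursive(node, [node])
--     return parent_chains
-- ===== SOURCE B (Python) =====
-- def find_parents_chain(reverse_graph, node):
--     parent_chains = []
--     visited = set()
--     stack = [(node, [node], True)]   # (current node, chain so far, is the root frame)
--     while stack:
--         cur, chain, is_root = stack.pop()
--         if not is_root:
--             parent_chains.append(chain)
--         if cur in reverse_graph and cur not in visited:
--             visited.add(cur)
--             for parent in reversed(reverse_graph[cur]):
--                 stack.append((parent, chain + [parent], False))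
--     return parent_chains
-- ===== Notes on version B (the rewrite author's own statement) =====
-- stated objective: alternative
-- what changed: The recursive DFS with a nested closure is replaced by an iterative DFS over an explicit LIFO stack of (node, chain, is_root) frames, pushing parents in reversed order to preserve the original preorder of appended chains.
import Mathlib
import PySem

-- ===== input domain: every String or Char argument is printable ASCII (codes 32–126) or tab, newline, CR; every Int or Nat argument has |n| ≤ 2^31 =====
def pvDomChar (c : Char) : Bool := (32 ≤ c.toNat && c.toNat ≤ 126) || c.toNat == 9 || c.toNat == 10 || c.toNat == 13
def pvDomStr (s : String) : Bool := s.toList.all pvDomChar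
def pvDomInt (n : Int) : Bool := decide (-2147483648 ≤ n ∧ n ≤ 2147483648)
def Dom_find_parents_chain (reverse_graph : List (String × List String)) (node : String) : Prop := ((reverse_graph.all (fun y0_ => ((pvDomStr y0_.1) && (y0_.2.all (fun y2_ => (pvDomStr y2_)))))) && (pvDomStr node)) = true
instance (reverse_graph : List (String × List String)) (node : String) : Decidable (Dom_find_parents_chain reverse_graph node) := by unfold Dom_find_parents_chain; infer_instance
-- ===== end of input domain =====

-- B replaces A's recursive DFS (nested closure) by an iterative DFS over an explicit stack
-- of (node, chain, is_root) frames; same output, no recursion (objective: alternative).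

-- number of distinct graph keys not yet visited: the termination measure shared by both ports
def pcMu (g : PySem.Dict String (List String)) (v : PySem.Set String) : Nat :=
  g.keys.countP (fun k => !(PySem.Set.contains v k))

theorem pcContains_add (v : PySem.Set String) (x k : String)
    (h : PySem.Set.contains v k = true) : PySem.Set.contains (PySem.Set.add v x) k = true := by
  simp only [PySem.Set.add]
  split
  · exact h
  · have hk : k ∈ v := by simpa using h
    simp [hk]

theorem pcContains_add_self (v : PySem.Set String) (x : String) :
    PySem.Set.contains (PySem.Set.add v x) x = true := by
  simp only [PySem.Set.add]
  split
  · assumption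
  · simp

-- a pointwise-smaller predicate that is strictly smaller at one element counts strictly less
theorem pcCountP_lt {α : Type} (l : List α) (p q : α → Bool)
    (hmono : ∀ a ∈ l, q a = true → p a = true) (a0 : α) (h0 : a0 ∈ l)
    (hp : p a0 = true) (hq : q a0 = false) : l.countP q < l.countP p := by
  induction l with
  | nil => cases h0
  | cons a l ih =>
    simp only [List.countP_cons]
    rcases List.mem_cons.mp h0 with h | h
    · subst h
      have hle : l.countP q ≤ l.countP p :=
        List.countP_mono_left (fun b hb => hmono b (List.mem_cons_of_mem _ hb))
      simp only [hp, hq]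
      simp
      omega
    · have hlt := ih (fun b hb => hmono b (List.mem_cons_of_mem _ hb)) h
      have hle1 : (if q a = true then 1 else 0) ≤ (if p a = true then 1 else 0) := by
        cases hqa : q a
        · simp
        · simp [hmono a List.mem_cons_self hqa]
      split_ifs at hle1 ⊢ <;> omega

-- termination helper cited by the ports' decreasing_by: marking an unvisited key visited
-- strictly shrinks the measure
theorem pcMu_add_lt (g : PySem.Dict String (List String)) (v : PySem.Set String) (cur : String)
    (hg : g.contains cur = true) (hv : PySem.Set.contains v cur = false) :
    pcMu g (PySem.Set.add v cur) < pcMu g v := by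
  unfold pcMu
  apply pcCountP_lt g.keys (fun k => !(PySem.Set.contains v k))
      (fun k => !(PySem.Set.contains (PySem.Set.add v cur) k)) ?_ cur
      ((PySem.Dict.contains_iff_mem_keys _ _).1 hg)
      (by simp only [hv, Bool.not_false])
      (by simp only [pcContains_add_self, Bool.not_true])
  intro a _ ha
  simp only [Bool.not_eq_true'] at ha ⊢
  cases hva : PySem.Set.contains v a
  · rfl
  · rw [pcContains_add v cur a hva] at ha
    cases ha

-- ===== PORT A =====
-- pcEnter is the nested _find_parents_recursive; the fuel is only a totality guard:
-- the body recurses only after marking a fresh graph key visited, so with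
-- fuel = (number of graph keys) the 0 branch is never reached.
def pcEnter (g : PySem.Dict String (List String)) (f : Nat) (v : PySem.Set String)
    (o : List (List String)) (cur : String) (chain : List String) :
    PySem.Set String × List (List String) :=
  match f with
  | 0 => (v, o)
  | f + 1 =>
    if g.contains cur && !(PySem.Set.contains v cur) then
      (g.getD cur []).foldl
        (fun st p => pcEnter g f st.1 (st.2 ++ [chain ++ [p]]) p (chain ++ [p]))
        (PySem.Set.add v cur, o)
    else (v, o)

def find_parents_chain (reverse_graph : List (String × List String)) (node : String) : List (List String) :=
  (pcEnter (PySem.Dict.mk reverse_graph) ((PySem.Dict.mk reverse_graph).keys).length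
    PySem.Set.empty [] node [node]).2

-- ===== PORT B =====
-- the while-loop over the explicit stack; head of the list = top of the stack,
-- so stack.extend over reversed(parents) is a foldl of cons over parents.reverse
def pcLoop (g : PySem.Dict String (List String)) (v : PySem.Set String)
    (o : List (List String)) (stack : List (String × List String × Bool)) :
    List (List String) :=
  match stack with
  | [] => o
  | (cur, chain, isRoot) :: rest =>
    let o2 := if isRoot then o else o ++ [chain]
    if h : g.contains cur && !(PySem.Set.contains v cur) then
      pcLoop g (PySem.Set.add v cur) o2
        (((g.getD cur []).reverse).foldl (fun st p => (p, chain ++ [p], false) :: st) rest)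
    else pcLoop g v o2 rest
termination_by (pcMu g v, stack.length)
decreasing_by
  · refine Prod.Lex.left _ _ ?_
    have h1 : g.contains cur = true := by
      cases hg : g.contains cur
      · rw [hg] at h; simp at h
      · rfl
    have h2 : PySem.Set.contains v cur = false := by
      cases hv : PySem.Set.contains v cur
      · rfl
      · rw [hv] at h; simp at h
    exact pcMu_add_lt g v cur h1 h2
  · exact Prod.Lex.right _ (Nat.lt_succ_self _)

def find_parents_chain_alt (reverse_graph : List (String × List String)) (node : String) : List (List String) :=
  pcLoop (PySem.Dict.mk reverse_graph) PySem.Set.empty [] [(node, [node], true)]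

-- ===== PRECONDITION & SPEC =====
def Spec_find_parents_chain (reverse_graph : List (String × List String)) (node : String) (out : List (List String)) : Prop := out = find_parents_chain_alt reverse_graph node
instance (reverse_graph : List (String × List String)) (node : String) (out : List (List String)) : Decidable (Spec_find_parents_chain reverse_graph node out) := by unfold Spec_find_parents_chain; infer_instance

-- ===== CLAIM (what is proved, stated in full; the proofs are below) =====
def Claim_equal_find_parents_chain : Prop := ∀ (reverse_graph : List (String × List String)) (node : String), Dom_find_parents_chain reverse_graph node → Spec_find_parents_chain reverse_graph node (find_parents_chain reverse_graph node)

-- ===== LEMMAS AND PROOFS =====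

-- the visited set only grows through pcEnter
theorem pcEnter_mono (g : PySem.Dict String (List String)) :
    ∀ (f : Nat) (v : PySem.Set String) (o : List (List String)) (cur : String)
      (chain : List String) (k : String), PySem.Set.contains v k = true →
      PySem.Set.contains (pcEnter g f v o cur chain).1 k = true := by
  intro f
  induction f with
  | zero => intro v o cur chain k h; exact h
  | succ f ih =>
    intro v o cur chain k h
    rw [pcEnter]
    split
    · have hstep : ∀ (l : List String) (st : PySem.Set String × List (List String)),
          PySem.Set.contains st.1 k = true →
          PySem.Set.contains
            ((l.foldl (fun st p => pcEnter g f st.1 (st.2 ++ [chain ++ [p]]) p (chain ++ [p])) st)).1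
            k = true := by
        intro l
        induction l with
        | nil => intro st hst; exact hst
        | cons a l ihl =>
          intro st hst
          simp only [List.foldl_cons]
          exact ihl _ (ih _ _ _ _ _ hst)
      exact hstep _ _ (pcContains_add v cur k h)
    · exact h

theorem pcMu_mono (g : PySem.Dict String (List String)) (v w : PySem.Set String)
    (h : ∀ k, PySem.Set.contains v k = true → PySem.Set.contains w k = true) :
    pcMu g w ≤ pcMu g v := by
  unfold pcMu
  apply List.countP_mono_left
  intro a _ ha
  simp only [Bool.not_eq_true'] at ha ⊢
  cases hva : PySem.Set.contains v a
  · rfl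
  · rw [h a hva] at ha; cases ha

-- pushing reversed(parents) one by one onto the stack = parents (mapped) in front
theorem pcPush (chain : List String) (l : List String) (rest : List (String × List String × Bool)) :
    (l.reverse).foldl (fun st p => (p, chain ++ [p], false) :: st) rest =
      l.map (fun p => (p, chain ++ [p], false)) ++ rest := by
  induction l generalizing rest with
  | nil => rfl
  | cons a l ih =>
    simp only [List.reverse_cons, List.foldl_append, List.foldl_cons, List.foldl_nil, List.map_cons]
    rw [ih]
    rfl

-- the simulation: popping one frame and running the loop = running A's recursion on
-- that frame, then the loop on the rest (fuel bounds the unvisited keys)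
theorem pcSim (g : PySem.Dict String (List String)) :
    ∀ (f : Nat) (v : PySem.Set String) (o : List (List String)) (cur : String)
      (chain : List String) (isRoot : Bool) (rest : List (String × List String × Bool)),
      pcMu g v ≤ f →
      pcLoop g v o ((cur, chain, isRoot) :: rest) =
        (let st := pcEnter g f v (if isRoot then o else o ++ [chain]) cur chain
         pcLoop g st.1 st.2 rest) := by
  intro f
  induction f with
  | zero =>
    intro v o cur chain isRoot rest hmu
    rw [pcLoop]
    by_cases hcond : (g.contains cur && !(PySem.Set.contains v cur)) = true
    · exfalso
      have hg : g.contains cur = true := by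
        cases hgc : g.contains cur
        · rw [hgc] at hcond; simp at hcond
        · rfl
      have hnv : PySem.Set.contains v cur = false := by
        cases hvc : PySem.Set.contains v cur
        · rfl
        · rw [hvc] at hcond; simp at hcond
      have hpos : 0 < pcMu g v := by
        unfold pcMu
        refine List.countP_pos_iff.mpr ⟨cur, (PySem.Dict.contains_iff_mem_keys _ _).1 hg, ?_⟩
        simp only [hnv, Bool.not_false]
      omega
    · rw [dif_neg hcond]
      rfl
  | succ f ih =>
    intro v o cur chain isRoot rest hmu
    rw [pcLoop]
    by_cases hcond : (g.contains cur && !(PySem.Set.contains v cur)) = true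
    · rw [dif_pos hcond]
      have hg : g.contains cur = true := by
        cases hgc : g.contains cur
        · rw [hgc] at hcond; simp at hcond
        · rfl
      have hnv : PySem.Set.contains v cur = false := by
        cases hvc : PySem.Set.contains v cur
        · rfl
        · rw [hvc] at hcond; simp at hcond
      have hmu2 : pcMu g (PySem.Set.add v cur) ≤ f := by
        have := pcMu_add_lt g v cur hg hnv; omega
      rw [pcPush chain (g.getD cur []) rest]
      have hgo : ∀ (parents : List String) (v0 : PySem.Set String) (o0 : List (List String)),
          pcMu g v0 ≤ f →
          pcLoop g v0 o0 (parents.map (fun p => (p, chain ++ [p], false)) ++ rest) =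
            (let st := parents.foldl
                (fun st p => pcEnter g f st.1 (st.2 ++ [chain ++ [p]]) p (chain ++ [p])) (v0, o0)
             pcLoop g st.1 st.2 rest) := by
        intro parents
        induction parents with
        | nil => intro v0 o0 _; rfl
        | cons p ps ihp =>
          intro v0 o0 hmu0
          simp only [List.map_cons, List.cons_append, List.foldl_cons]
          rw [ih v0 o0 p (chain ++ [p]) false (ps.map (fun q => (q, chain ++ [q], false)) ++ rest) hmu0]
          simp only [Bool.false_eq_true, if_false]
          apply ihp
          exact le_trans (pcMu_mono g v0 _ (fun k hk => pcEnter_mono g f v0 _ p _ k hk)) hmu0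
      rw [hgo (g.getD cur []) (PySem.Set.add v cur) (if isRoot then o else o ++ [chain]) hmu2]
      simp only [pcEnter]
      rw [if_pos hcond]
    · rw [dif_neg hcond]
      simp only [pcEnter]
      rw [if_neg hcond]

-- ===== VERDICT (by name: the statement is the Claim_ definition above) =====
theorem find_parents_chain_spec : Claim_equal_find_parents_chain := by
  intro reverse_graph node _
  unfold Spec_find_parents_chain find_parents_chain find_parents_chain_alt
  rw [pcSim (PySem.Dict.mk reverse_graph) ((PySem.Dict.mk reverse_graph).keys).length
      PySem.Set.empty [] node [node] true [] (by unfold pcMu; exact List.countP_le_length)]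
  simp [pcLoop]
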